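-- pv_equiv track=rewrite | github.com/Enolerobotti/Language_learn | ancillary.py | desired_word
-- ===== SOURCE A (Python) =====
-- def desired_word(s):
--     i = 0
--     s = s.replace('(', '').replace(')', '')
--     new_s = ''
--     while i < len(s) and s[i] not in '-\n,.;:/\t_[{]}*+^#$!?':
--         new_s = new_s + s[i]
--         i += 1
--     return new_s.strip(' ')
-- ===== SOURCE B (Python) =====
-- DELIMS = '-\n,.;:/\t_[{]}*+^#$!?'
--
-- def desired_word(s):
--     s = s.replace('(', '').replace(')', '')
--     cut = len(s)
--     for d in DELIMS:
--         j = s.find(d)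
--         if 0 <= j < cut:
--             cut = j
--     return s[:cut].strip(' ')
-- ===== Notes on version B (the rewrite author's own statement) =====
-- stated objective: faster
-- what changed: Replaces A's while-loop that grows the prefix one character at a time via repeated string concatenation (quadratic) by one s.find pass per delimiter, keeping the minimum match position and slicing the prefix off in a single step.
import Mathlib
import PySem

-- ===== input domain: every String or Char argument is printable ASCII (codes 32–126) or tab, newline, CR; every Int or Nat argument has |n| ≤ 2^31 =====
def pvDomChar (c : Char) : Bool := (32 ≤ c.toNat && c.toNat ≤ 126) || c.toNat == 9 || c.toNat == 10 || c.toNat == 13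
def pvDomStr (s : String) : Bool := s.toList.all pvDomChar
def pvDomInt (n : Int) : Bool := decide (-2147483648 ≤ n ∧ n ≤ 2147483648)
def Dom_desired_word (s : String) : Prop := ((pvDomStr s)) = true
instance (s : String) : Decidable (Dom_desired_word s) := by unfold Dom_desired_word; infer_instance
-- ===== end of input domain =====

-- B replaces A's while-loop (which grows the prefix by repeated string concatenation) with
-- one s.find pass per delimiter, taking the minimum match position and slicing once (faster).

def pvDelims : List Char := "-\n,.;:/\t_[{]}*+^#$!?".toList

-- ===== PORT A =====
-- the while-loop: i/new_s state, as the obvious structural recursion over the remaining chars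
def dwLoopA (acc : List Char) : List Char → List Char
  | [] => acc
  | c :: rest => if PySem.Chars.isIn [c] pvDelims then acc else dwLoopA (acc ++ [c]) rest

def desired_word (s : String) : String :=
  let t := PySem.Chars.replace (PySem.Chars.replace s.toList ['('] []) [')'] []
  String.ofList (PySem.Chars.stripChars (dwLoopA [] t) [' '])

-- ===== PORT B =====
-- cut = len(s); for d in DELIMS: j = s.find(d); if 0 <= j < cut: cut = j
def dwCutB (t : List Char) : Int :=
  pvDelims.foldl (fun cut d =>
    let j := PySem.Chars.find t [d]
    if 0 ≤ j ∧ j < cut then j else cut) ((t.length : Nat) : Int)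

def desired_word_alt (s : String) : String :=
  let t := PySem.Chars.replace (PySem.Chars.replace s.toList ['('] []) [')'] []
  String.ofList (PySem.Chars.stripChars (PySem.Chars.slice t none (some (dwCutB t))) [' '])

-- ===== PRECONDITION & SPEC =====
def Spec_desired_word (s : String) (out : String) : Prop := out = desired_word_alt s
instance (s : String) (out : String) : Decidable (Spec_desired_word s out) := by unfold Spec_desired_word; infer_instance

-- ===== CLAIM (what is proved, stated in full; the proofs are below) =====
def Claim_equal_desired_word : Prop := ∀ (s : String), Dom_desired_word s → Spec_desired_word s (desired_word s)

-- ===== LEMMAS AND PROOFS =====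

-- the delimiter test
def dwQ (c : Char) : Bool := PySem.Chars.isIn [c] pvDelims

lemma dwQ_iff (c : Char) : dwQ c = true ↔ c ∈ pvDelims := by
  unfold dwQ
  rw [PySem.Chars.isIn_iff_infix, List.singleton_infix_iff]

-- single-char find facts
lemma find_singleton_nonneg {t : List Char} {d : Char} (h : d ∈ t) :
    0 ≤ PySem.Chars.find t [d] := by
  rw [PySem.Chars.find_nonneg_iff, List.singleton_infix_iff]; exact h

lemma singleton_prefix_iff {d : Char} {l : List Char} : [d] <+: l ↔ l.head? = some d := by
  constructor
  · rintro ⟨r, rfl⟩; rfl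
  · intro h
    cases l with
    | nil => simp at h
    | cons x xs => simp at h; exact ⟨xs, by simp [h]⟩

lemma find_singleton_spec {t : List Char} {d : Char} (h : 0 ≤ PySem.Chars.find t [d]) :
    t[(PySem.Chars.find t [d]).toNat]? = some d ∧
      ∀ i < (PySem.Chars.find t [d]).toNat, t[i]? ≠ some d := by
  obtain ⟨hpre, hmin⟩ := PySem.Chars.find_spec h
  rw [singleton_prefix_iff, List.head?_drop] at hpre
  refine ⟨hpre, fun i hi hcon => ?_⟩
  exact hmin i hi (by rw [singleton_prefix_iff, List.head?_drop]; exact hcon)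

-- the fold's step
lemma step_le (t : List Char) (cut : Int) (d : Char) :
    (let j := PySem.Chars.find t [d]; if 0 ≤ j ∧ j < cut then j else cut) ≤ cut := by
  dsimp only; split_ifs with h
  · exact le_of_lt h.2
  · exact le_refl _

lemma fold_le_init (t : List Char) (ds : List Char) :
    ∀ cut : Int,
      ds.foldl (fun cut d => let j := PySem.Chars.find t [d];
        if 0 ≤ j ∧ j < cut then j else cut) cut ≤ cut := by
  induction ds with
  | nil => intro cut; exact le_refl _
  | cons d ds ih =>
      intro cut
      exact le_trans (ih _) (step_le t cut d)

lemma fold_le_of_mem (t : List Char) (ds : List Char) {d : Char} (hd : d ∈ ds)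
    (h0 : 0 ≤ PySem.Chars.find t [d]) :
    ∀ cut : Int,
      ds.foldl (fun cut d => let j := PySem.Chars.find t [d];
        if 0 ≤ j ∧ j < cut then j else cut) cut ≤ PySem.Chars.find t [d] := by
  induction ds with
  | nil => cases hd
  | cons e ds ih =>
      intro cut
      rcases List.mem_cons.mp hd with rfl | hmem
      · refine le_trans (fold_le_init t ds _) ?_
        dsimp only; split_ifs with h
        · exact le_refl _
        · omega
      · exact ih hmem _

lemma fold_cases (t : List Char) (ds : List Char) :
    ∀ cut : Int,
      (ds.foldl (fun cut d => let j := PySem.Chars.find t [d];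
        if 0 ≤ j ∧ j < cut then j else cut) cut = cut) ∨
      (∃ d ∈ ds, ds.foldl (fun cut d => let j := PySem.Chars.find t [d];
        if 0 ≤ j ∧ j < cut then j else cut) cut = PySem.Chars.find t [d] ∧
        0 ≤ PySem.Chars.find t [d]) := by
  induction ds with
  | nil => intro cut; left; rfl
  | cons e ds ih =>
      intro cut
      rcases ih ((fun cut d => let j := PySem.Chars.find t [d];
          if 0 ≤ j ∧ j < cut then j else cut) cut e) with h | ⟨d, hd, heq, hpos⟩
      · rw [List.foldl_cons, h]
        dsimp only; split_ifs with hc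
        · exact Or.inr ⟨e, List.mem_cons_self, rfl, hc.1⟩
        · exact Or.inl rfl
      · exact Or.inr ⟨d, List.mem_cons_of_mem _ hd, heq, hpos⟩

-- findIdx helpers
lemma findIdx_le_of_pos {l : List Char} {p : Char → Bool} {i : Nat}
    (h : i < l.length) (hp : p l[i] = true) : l.findIdx p ≤ i := by
  by_contra hcon
  obtain ⟨_, hall⟩ := (List.lt_findIdx_iff l p i).mp (Nat.not_le.mp hcon)
  rw [hall i (le_refl i)] at hp
  exact Bool.false_ne_true hp

lemma dwCutB_eq (t : List Char) : dwCutB t = ((t.findIdx dwQ : Nat) : Int) := by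
  have hC : dwCutB t = pvDelims.foldl (fun cut d =>
      let j := PySem.Chars.find t [d];
      if 0 ≤ j ∧ j < cut then j else cut) ((t.length : Nat) : Int) := rfl
  have hKlen : t.findIdx dwQ ≤ t.length := List.findIdx_le_length
  have hge : ((t.findIdx dwQ : Nat) : Int) ≤ dwCutB t := by
    rcases fold_cases t pvDelims ((t.length : Nat) : Int) with h | ⟨d, hd, heq, hpos⟩
    · rw [hC, h]; exact_mod_cast hKlen
    · obtain ⟨hget, _⟩ := find_singleton_spec hpos
      have hlt : (PySem.Chars.find t [d]).toNat < t.length := by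
        by_contra hcon
        rw [List.getElem?_eq_none (by omega)] at hget
        simp at hget
      rw [List.getElem?_eq_getElem hlt] at hget
      have heqd : t[(PySem.Chars.find t [d]).toNat]'hlt = d := by injection hget
      have hdq : dwQ (t[(PySem.Chars.find t [d]).toNat]'hlt) = true := by
        rw [heqd, dwQ_iff]; exact hd
      have hKle := findIdx_le_of_pos hlt hdq
      rw [hC, heq]; omega
  have hle : dwCutB t ≤ ((t.findIdx dwQ : Nat) : Int) := by
    by_cases hK : t.findIdx dwQ < t.length
    · have hq : dwQ (t[t.findIdx dwQ]'hK) = true := List.findIdx_getElem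
      have hdmem : (t[t.findIdx dwQ]'hK) ∈ pvDelims := (dwQ_iff _).mp hq
      have hdt : (t[t.findIdx dwQ]'hK) ∈ t := List.getElem_mem hK
      have hpos := find_singleton_nonneg hdt
      obtain ⟨_, hmin⟩ := find_singleton_spec hpos
      have hfle : (PySem.Chars.find t [t[t.findIdx dwQ]'hK]).toNat ≤ t.findIdx dwQ := by
        by_contra hcon
        exact hmin (t.findIdx dwQ) (by omega) (by rw [List.getElem?_eq_getElem hK])
      have hfold := fold_le_of_mem t pvDelims hdmem hpos ((t.length : Nat) : Int)
      rw [hC]; omega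
    · have hKeq : t.findIdx dwQ = t.length := by omega
      rw [hC, hKeq]
      exact fold_le_init t pvDelims _
  omega

lemma takeWhile_not_eq_take_findIdx (t : List Char) :
    t.takeWhile (fun c => !dwQ c) = t.take (t.findIdx dwQ) := by
  induction t with
  | nil => rfl
  | cons c rest ih =>
      rw [List.takeWhile_cons, List.findIdx_cons]
      cases hq : dwQ c with
      | true => simp
      | false => simp [ih]

lemma dwLoopA_eq (l : List Char) : ∀ acc : List Char,
    dwLoopA acc l = acc ++ l.takeWhile (fun c => !dwQ c) := by
  induction l with
  | nil => intro acc; simp [dwLoopA]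
  | cons c rest ih =>
      intro acc
      rw [dwLoopA, List.takeWhile_cons]
      cases hq : PySem.Chars.isIn [c] pvDelims with
      | true => simp [dwQ, hq]
      | false => simp [dwQ, hq, ih (acc ++ [c])]

lemma core_eq (t : List Char) :
    dwLoopA [] t = PySem.Chars.slice t none (some (dwCutB t)) := by
  rw [dwLoopA_eq t [], List.nil_append, dwCutB_eq,
    PySem.Chars.slice_eq_listSlice, PySem.List.slice_to_natCast,
    takeWhile_not_eq_take_findIdx]

-- ===== VERDICT (by name: the statement is the Claim_ definition above) =====
theorem desired_word_spec : Claim_equal_desired_word := by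
  intro s _
  unfold Spec_desired_word desired_word desired_word_alt
  simp only [core_eq]
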